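-- pv_equiv track=rewrite | github.com/mcarson75/adventofcode | 2018/Day 8/Day 8.py | parse
-- ===== SOURCE A (Python) =====
-- def parse(data):
--     child, metas = data[:2]
--     data = data[2:]
--     scores = []
--     totals = 0
--
--     for _ in range(child):
--         total, score, data = parse(data)
--         totals += total
--         scores.append(score)
--
--     totals += sum(data[:metas])
--
--     if child == 0:
--         return (totals, sum(data[:metas]), data[metas:])
--     else:
--         return (
--             totals,
--             sum(scores[k - 1] for k in data[:metas] if k > 0 and k <= len(scores)),
--             data[metas:],
--         )
-- ===== SOURCE B (Python) =====
-- def parse(data):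
--     # Iterative stream parser: explicit stack of frames instead of recursion.
--     # frame = [remaining_children, declared_children, metas, totals, scores]
--     child, metas = data[:2]
--     data = data[2:]
--     stack = [[child, child, metas, 0, []]]
--     while True:
--         frame = stack[-1]
--         if frame[0] > 0:
--             frame[0] -= 1
--             child, metas = data[:2]
--             data = data[2:]
--             stack.append([child, child, metas, 0, []])
--         else:
--             _, child, metas, totals, scores = frame
--             meta = data[:metas]
--             data = data[metas:]
--             totals += sum(meta)
--             if child == 0:
--                 score = sum(meta)
--             else:
--                 score = sum(scores[k - 1] for k in meta if 0 < k <= len(scores))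
--             stack.pop()
--             if not stack:
--                 return (totals, score, data)
--             parent = stack[-1]
--             parent[3] += totals
--             parent[4].append(score)
-- ===== Notes on version B (the rewrite author's own statement) =====
-- stated objective: alternative
-- what changed: A's recursive descent (one Python call frame per tree node) is replaced by a single iterative while-loop over a cursor into the stream with an explicit stack of frames (remaining-children, declared children, metas, totals, scores), popping a frame folds its total/score into its parent.
import Mathlib
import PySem

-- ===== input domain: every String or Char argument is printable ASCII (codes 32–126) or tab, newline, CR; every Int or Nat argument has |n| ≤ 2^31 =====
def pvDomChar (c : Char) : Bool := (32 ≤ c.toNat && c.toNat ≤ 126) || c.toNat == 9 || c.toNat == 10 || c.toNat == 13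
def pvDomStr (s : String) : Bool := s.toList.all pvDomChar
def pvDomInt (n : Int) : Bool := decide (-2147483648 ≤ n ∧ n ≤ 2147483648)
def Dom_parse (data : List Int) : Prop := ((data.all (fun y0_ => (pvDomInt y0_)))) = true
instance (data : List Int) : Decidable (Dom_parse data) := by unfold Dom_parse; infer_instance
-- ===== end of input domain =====

-- B replaces A's recursion with an iterative stream parser over an explicit stack of frames
-- (no Python recursion); equal return values are proved on every well-formed stream (Pre_parse).

-- ===== PORT A =====
-- the metadata stage of A's parse: everything after the children loop
def parseFinish (child metas : Int) (r : Int × List Int × List Int) : Int × Int × List Int :=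
  let totals := r.1 + (PySem.List.slice r.2.2 none (some metas)).sum
  if child == 0 then
    (totals, (PySem.List.slice r.2.2 none (some metas)).sum, PySem.List.slice r.2.2 (some metas) none)
  else
    (totals,
     (PySem.List.slice r.2.2 none (some metas)).foldl
       (fun acc k => if 0 < k ∧ k ≤ PySem.List.len r.2.1 then acc + (PySem.List.pyGet? r.2.1 (k - 1)).getD 0 else acc) 0,
     PySem.List.slice r.2.2 (some metas) none)

mutual
/-- fuel-indexed port of A's recursive `parse`; `none` = ValueError (missing header) or fuel out. -/
def parseF : Nat → List Int → Option (Int × Int × List Int)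
  | 0, _ => none
  | f + 1, child :: metas :: rest => (parseChildren f child.toNat rest 0 []).map (parseFinish child metas)
  | _ + 1, _ => none
termination_by f _ => (f, 0)

/-- A's `for _ in range(child)` loop accumulating `totals` and `scores`. -/
def parseChildren : Nat → Nat → List Int → Int → List Int → Option (Int × List Int × List Int)
  | _, 0, d, totals, scores => some (totals, scores, d)
  | f, n + 1, d, totals, scores =>
    (parseF f d).bind fun r => parseChildren f n r.2.2 (totals + r.1) (scores ++ [r.2.1])
termination_by f n _ _ _ => (f, n + 1)
end

def parse (data : List Int) : Int × Int × List Int :=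
  (parseF (data.length + 1) data).getD (0, 0, [])

-- ===== PORT B =====
-- the pop step of B's loop: close the finished top frame
def parseClose (child metas totals : Int) (scores : List Int) (d : List Int) : Int × Int × List Int :=
  let t := totals + (PySem.List.slice d none (some metas)).sum
  if child == 0 then
    (t, (PySem.List.slice d none (some metas)).sum, PySem.List.slice d (some metas) none)
  else
    (t,
     (PySem.List.slice d none (some metas)).foldl
       (fun acc k => if 0 < k ∧ k ≤ PySem.List.len scores then acc + (PySem.List.pyGet? scores (k - 1)).getD 0 else acc) 0,
     PySem.List.slice d (some metas) none)

/-- B's `while True` loop over (cursor data, stack of frames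
(remaining, declared children, metas, totals, scores)); `none` = ValueError or fuel out. -/
def parseLoop : Nat → List Int → List (Int × Int × Int × Int × List Int) → Option (Int × Int × List Int)
  | 0, _, _ => none
  | _ + 1, _, [] => none
  | f + 1, data, (rem, child, metas, totals, scores) :: rest =>
    if rem > 0 then
      match data with
      | c :: m :: d => parseLoop f d ((c, c, m, 0, ([] : List Int)) :: (rem - 1, child, metas, totals, scores) :: rest)
      | _ => none
    else
      let r := parseClose child metas totals scores data
      match rest with
      | [] => some r
      | (prem, pc, pm, pt, psc) :: rr => parseLoop f r.2.2 ((prem, pc, pm, pt + r.1, psc ++ [r.2.1]) :: rr)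

def parse_alt (data : List Int) : Int × Int × List Int :=
  match data with
  | child :: metas :: d => (parseLoop (d.length + 1) d [(child, child, metas, 0, [])]).getD (0, 0, [])
  | _ => (0, 0, [])

-- ===== PRECONDITION & SPEC =====
/-- children step of the shape checker: check `n` consecutive nodes with checker `step`. -/
def chkKids (step : List Int → Option (List Int)) : Nat → List Int → Option (List Int)
  | 0, d => some d
  | n + 1, d => (step d).bind (chkKids step n)

/-- Shape checker (headers only, no totals/scores are computed): `some` iff every node's
2-element header is present; well-formedness of a length-prefixed tree stream — "a header
`child, metas`, then `child` well-formed subtrees, then `metas` metadata entries" — is an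
inherently recursive grammar, so this condition is stated as a structural recursion on the
stream (fuel bounded by its length), not as a copy of either port (no totals/scores/values). -/
def chkNode : Nat → List Int → Option (List Int) :=
  Nat.rec (motive := fun _ => List Int → Option (List Int))
    (fun _ => none)
    (fun _ ih data =>
      match data with
      | child :: metas :: rest =>
        (chkKids ih child.toNat rest).map (fun d => PySem.List.slice d (some metas) none)
      | _ => none)

-- Pre_parse holds exactly when A returns: on streams missing some node's 2-int header A raises
-- ValueError from `child, metas = data[:2]`.
def Pre_parse (data : List Int) : Prop := (chkNode (data.length + 1) data).isSome = true
instance (data : List Int) : Decidable (Pre_parse data) := by unfold Pre_parse; infer_instance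

def pvWitness_parse : List Int := [2, 3, 0, 3, 10, 11, 12, 1, 1, 0, 1, 99, 2, 1, 1, 2]

def Spec_parse (data : List Int) (out : Int × Int × List Int) : Prop := out = parse_alt data
instance (data : List Int) (out : Int × Int × List Int) : Decidable (Spec_parse data out) := by unfold Spec_parse; infer_instance

-- ===== CLAIM (what is proved, stated in full; the proofs are below) =====
def Claim_equal_parse : Prop := ∀ (data : List Int), Dom_parse data → Pre_parse data → Spec_parse data (parse data)

-- ===== LEMMAS AND PROOFS =====

theorem close_eq_finish (c m t : Int) (sc : List Int) (d : List Int) :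
    parseClose c m t sc d = parseFinish c m (t, sc, d) := rfl

theorem len_finish (c m : Int) (r : Int × List Int × List Int) :
    (parseFinish c m r).2.2.length ≤ r.2.2.length := by
  unfold parseFinish
  split <;> simp [PySem.List.slice_some_none]

-- the shape checker is the remainder projection of A's parser
theorem chkNode_succ (f : Nat) (data : List Int) :
    chkNode (f + 1) data =
      match data with
      | child :: metas :: rest =>
        (chkKids (chkNode f) child.toNat rest).map (fun d => PySem.List.slice d (some metas) none)
      | _ => none := rfl

theorem chk_proj : ∀ f : Nat,
    (∀ data, chkNode f data = (parseF f data).map (fun r => r.2.2)) ∧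
    (∀ n data t sc, chkKids (chkNode f) n data = (parseChildren f n data t sc).map (fun r => r.2.2)) := by
  intro f
  induction f with
  | zero =>
    constructor
    · intro data; simp [chkNode, parseF]
    · intro n data t sc
      cases n with
      | zero => simp [chkKids, parseChildren]
      | succ k => simp [chkKids, parseChildren, chkNode, parseF]
  | succ f ih =>
    have node : ∀ data, chkNode (f + 1) data = (parseF (f + 1) data).map (fun r => r.2.2) := by
      intro data
      match data with
      | [] => simp [chkNode_succ, parseF]
      | [c] => simp [chkNode_succ, parseF]
      | c :: m :: rest =>
        rw [chkNode_succ, parseF]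
        show (chkKids (chkNode f) c.toNat rest).map _ = _
        rw [ih.2 c.toNat rest 0 []]
        cases hp : parseChildren f c.toNat rest 0 [] with
        | none => simp
        | some r =>
          simp only [Option.map_some]
          congr 1
          unfold parseFinish
          split <;> simp
    refine ⟨node, ?_⟩
    intro n
    induction n with
    | zero => intro data t sc; simp [chkKids, parseChildren]
    | succ k ihk =>
      intro data t sc
      rw [chkKids, parseChildren, node data]
      cases hp : parseF (f + 1) data with
      | none => simp
      | some r => simp only [Option.map_some, Option.bind_some]; exact ihk _ _ _

-- continuation after popping a finished frame with result r
def popCont (g : Nat) (r : Int × Int × List Int) :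
    List (Int × Int × Int × Int × List Int) → Option (Int × Int × List Int)
  | [] => some r
  | (prem, pc, pm, pt, psc) :: rr => parseLoop g r.2.2 ((prem, pc, pm, pt + r.1, psc ++ [r.2.1]) :: rr)

theorem parseLoop_eq (f : Nat) (data : List Int) (rem c m t : Int) (sc : List Int)
    (rest : List (Int × Int × Int × Int × List Int)) :
    parseLoop (f + 1) data ((rem, c, m, t, sc) :: rest) =
      if rem > 0 then
        match data with
        | c' :: m' :: d => parseLoop f d ((c', c', m', 0, ([] : List Int)) :: (rem - 1, c, m, t, sc) :: rest)
        | _ => none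
      else
        let r := parseClose c m t sc data
        match rest with
        | [] => some r
        | (prem, pc, pm, pt, psc) :: rr => parseLoop f r.2.2 ((prem, pc, pm, pt + r.1, psc ++ [r.2.1]) :: rr) := rfl

theorem parseLoop_pop (f : Nat) (data : List Int) (rem c m t : Int) (sc : List Int)
    (rest : List (Int × Int × Int × Int × List Int)) (h : ¬ rem > 0) :
    parseLoop (f + 1) data ((rem, c, m, t, sc) :: rest) = popCont f (parseClose c m t sc data) rest := by
  rw [parseLoop_eq, if_neg h]
  cases rest with
  | nil => rfl
  | cons p rr => obtain ⟨prem, pc, pm, pt, psc⟩ := p; rfl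

theorem parseLoop_rem_irrel (f : Nat) (data : List Int) (rem rem' c m t : Int) (sc : List Int)
    (rest : List (Int × Int × Int × Int × List Int)) (h : rem ≤ 0) (h' : rem' ≤ 0) :
    parseLoop f data ((rem, c, m, t, sc) :: rest) = parseLoop f data ((rem', c, m, t, sc) :: rest) := by
  cases f with
  | zero => rfl
  | succ f => rw [parseLoop_eq, parseLoop_eq, if_neg (by omega), if_neg (by omega)]

theorem parseLoop_mono : ∀ f data stack r, parseLoop f data stack = some r →
    parseLoop (f + 1) data stack = some r := by
  intro f
  induction f with
  | zero => intro data stack r h; simp [parseLoop] at h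
  | succ f ih =>
    intro data stack r h
    match stack with
    | [] => simp [parseLoop] at h
    | (rem, c, m, t, sc) :: rest =>
      rw [parseLoop_eq] at h ⊢
      by_cases hr : rem > 0
      · rw [if_pos hr] at h ⊢
        match data with
        | [] => simp at h
        | [x] => simp at h
        | c' :: m' :: d => exact ih _ _ _ h
      · rw [if_neg hr] at h ⊢
        cases rest with
        | nil => exact h
        | cons p rr => obtain ⟨prem, pc, pm, pt, psc⟩ := p; exact ih _ _ _ h

theorem parseLoop_mono_le (f g : Nat) (data : List Int) (stack : List (Int × Int × Int × Int × List Int))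
    (r : Int × Int × List Int) (hfg : f ≤ g) (h : parseLoop f data stack = some r) :
    parseLoop g data stack = some r := by
  induction g, hfg using Nat.le_induction with
  | base => exact h
  | succ g _ ih => exact parseLoop_mono _ _ _ _ ih

-- the main simulation: A's recursion is tracked by B's stack machine, with a fuel bound
theorem simulation : ∀ f : Nat,
    (∀ data t s d, parseF f data = some (t, s, d) →
      ∀ c m d0, data = c :: m :: d0 →
      ∀ stack g r, popCont g (t, s, d) stack = some r →
      ∃ h, h + d.length + 1 ≤ g + data.length ∧
        parseLoop h d0 ((c, c, m, 0, []) :: stack) = some r) ∧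
    (∀ (rem : Int) data t0 sc0 t sc d, parseChildren f rem.toNat data t0 sc0 = some (t, sc, d) →
      ∀ c m stack g r, parseLoop g d (((0 : Int), c, m, t, sc) :: stack) = some r →
      ∃ h, h + d.length ≤ g + data.length ∧
        parseLoop h data ((rem, c, m, t0, sc0) :: stack) = some r) := by
  intro f
  induction f with
  | zero =>
    constructor
    · intro data t s d h; simp [parseF] at h
    · intro rem data t0 sc0 t sc d h c m stack g r hB
      cases hn : rem.toNat with
      | zero =>
        rw [hn] at h
        rw [parseChildren] at h
        simp only [Option.some.injEq, Prod.mk.injEq] at h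
        obtain ⟨rfl, rfl, rfl⟩ := h
        refine ⟨g, by omega, ?_⟩
        rw [parseLoop_rem_irrel _ _ rem 0 _ _ _ _ _ (by omega) (by omega)]
        exact hB
      | succ k =>
        rw [hn] at h
        rw [parseChildren] at h
        simp [parseF] at h
  | succ f ih =>
    have Q : ∀ data t s d, parseF (f + 1) data = some (t, s, d) →
        ∀ c m d0, data = c :: m :: d0 →
        ∀ stack g r, popCont g (t, s, d) stack = some r →
        ∃ h, h + d.length + 1 ≤ g + data.length ∧
          parseLoop h d0 ((c, c, m, 0, []) :: stack) = some r := by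
      intro data t s d h c m d0 hdata stack g r hpop
      subst hdata
      rw [parseF] at h
      cases hp : parseChildren f c.toNat d0 0 [] with
      | none => rw [hp] at h; simp at h
      | some rr =>
        rw [hp] at h
        simp only [Option.map_some, Option.some.injEq] at h
        have hstep : parseLoop (g + 1) rr.2.2 (((0 : Int), c, m, rr.1, rr.2.1) :: stack) = some r := by
          rw [parseLoop_pop _ _ _ _ _ _ _ _ (by omega), close_eq_finish]
          have heta : ((rr.1, rr.2.1, rr.2.2) : Int × List Int × List Int) = rr := rfl
          rw [heta, h]
          exact hpop
        obtain ⟨h1, hb1, hl1⟩ :=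
          ih.2 c d0 0 [] rr.1 rr.2.1 rr.2.2 (by rw [hp]) c m stack (g + 1) r hstep
        refine ⟨h1, ?_, hl1⟩
        have hlen : d.length ≤ rr.2.2.length := by
          have hf := len_finish c m rr
          rw [h] at hf
          exact hf
        simp only [List.length_cons] at *
        omega
    refine ⟨Q, ?_⟩
    have P : ∀ n (rem : Int), rem.toNat = n →
        ∀ data t0 sc0 t sc d, parseChildren (f + 1) n data t0 sc0 = some (t, sc, d) →
        ∀ c m stack g r, parseLoop g d (((0 : Int), c, m, t, sc) :: stack) = some r →
        ∃ h, h + d.length ≤ g + data.length ∧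
          parseLoop h data ((rem, c, m, t0, sc0) :: stack) = some r := by
      intro n
      induction n with
      | zero =>
        intro rem hn data t0 sc0 t sc d h c m stack g r hB
        rw [parseChildren] at h
        simp only [Option.some.injEq, Prod.mk.injEq] at h
        obtain ⟨rfl, rfl, rfl⟩ := h
        refine ⟨g, by omega, ?_⟩
        rw [parseLoop_rem_irrel _ _ rem 0 _ _ _ _ _ (by omega) (by omega)]
        exact hB
      | succ k ihk =>
        intro rem hn data t0 sc0 t sc d h c m stack g r hB
        rw [parseChildren] at h
        cases hp : parseF (f + 1) data with
        | none => rw [hp] at h; simp at h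
        | some r1 =>
          rw [hp] at h
          simp only [Option.bind_some] at h
          have hshape : ∃ c' m' d0, data = c' :: m' :: d0 := by
            match data with
            | [] => simp [parseF] at hp
            | [x] => simp [parseF] at hp
            | c' :: m' :: d0 => exact ⟨_, _, _, rfl⟩
          obtain ⟨c', m', d0, rfl⟩ := hshape
          obtain ⟨h1, hb1, hl1⟩ :=
            ihk (rem - 1) (by omega) r1.2.2 (t0 + r1.1) (sc0 ++ [r1.2.1]) t sc d h c m stack g r hB
          have hpopc : popCont h1 (r1.1, r1.2.1, r1.2.2) ((rem - 1, c, m, t0, sc0) :: stack) = some r := hl1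
          obtain ⟨h2, hb2, hl2⟩ :=
            Q (c' :: m' :: d0) r1.1 r1.2.1 r1.2.2 (by rw [hp]) c' m' d0 rfl
              ((rem - 1, c, m, t0, sc0) :: stack) h1 r hpopc
          refine ⟨h2 + 1, ?_, ?_⟩
          · simp only [List.length_cons] at *
            omega
          · rw [parseLoop_eq, if_pos (by omega)]
            exact hl2
    intro rem data t0 sc0 t sc d h
    exact P rem.toNat rem rfl data t0 sc0 t sc d h

-- ===== VERDICT (by name: the statement is the Claim_ definition above) =====
theorem parse_spec : Claim_equal_parse := by
  intro data _hdom hpre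
  unfold Spec_parse
  unfold Pre_parse at hpre
  rw [(chk_proj (data.length + 1)).1 data] at hpre
  cases hp : parseF (data.length + 1) data with
  | none => rw [hp] at hpre; simp at hpre
  | some res =>
    obtain ⟨t, s, d⟩ := res
    have hshape : ∃ c m d0, data = c :: m :: d0 := by
      match data with
      | [] => simp [parseF] at hp
      | [x] => simp [parseF] at hp
      | c :: m :: d0 => exact ⟨_, _, _, rfl⟩
    obtain ⟨c, m, d0, rfl⟩ := hshape
    obtain ⟨h, hb, hl⟩ :=
      (simulation ((c :: m :: d0).length + 1)).1 _ t s d hp c m d0 rfl [] 0 (t, s, d) rfl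
    have hfuel : h ≤ d0.length + 1 := by
      simp only [List.length_cons] at hb; omega
    show parse (c :: m :: d0) = parse_alt (c :: m :: d0)
    unfold parse parse_alt
    rw [hp]
    show (some (t, s, d)).getD (0, 0, []) =
      (parseLoop (d0.length + 1) d0 [(c, c, m, 0, [])]).getD (0, 0, [])
    rw [parseLoop_mono_le h (d0.length + 1) _ _ _ hfuel hl]
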